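-- pv_equiv track=rewrite | github.com/cutsi/Normalization-in-3rd-normal-form | NormalizacijaU3NF.py | CheckIfKeyExist
-- ===== SOURCE A (Python) =====
-- def CheckIfKeyExist(key , lst):
--     cnt = 0                               #provjerava postoji li kljuc u listi parova u svrhu POPRAVIT OVU VJV
--     for k in lst:
--         for i in key:
--             if i in k and i.isalpha():                               #njegovog dodavanja ili ne dodavanja
--                 cnt = cnt + 1
--         if cnt == len(key):
--             return 0
--         cnt = 0
--     lst.append('[' + key + ']')
--     return 1
-- ===== SOURCE B (Python) =====
-- def CheckIfKeyExist(key, lst):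
--     # hoist the per-element character-counting: key qualifies iff every char is
--     # alphabetic and the set of its chars is a subset of the element's chars
--     all_alpha = all(c.isalpha() for c in key)
--     kset = set(key)
--     if all_alpha:
--         for k in lst:
--             if kset <= set(k):
--                 return 0
--     lst.append('[' + key + ']')
--     return 1
-- ===== Notes on version B (the rewrite author's own statement) =====
-- stated objective: faster
-- what changed: Hoists the isalpha check out of the loop (computed once for the whole key) and replaces the inner per-character substring-counting loop by a single precomputed-set subset test per list element.
import Mathlib
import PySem

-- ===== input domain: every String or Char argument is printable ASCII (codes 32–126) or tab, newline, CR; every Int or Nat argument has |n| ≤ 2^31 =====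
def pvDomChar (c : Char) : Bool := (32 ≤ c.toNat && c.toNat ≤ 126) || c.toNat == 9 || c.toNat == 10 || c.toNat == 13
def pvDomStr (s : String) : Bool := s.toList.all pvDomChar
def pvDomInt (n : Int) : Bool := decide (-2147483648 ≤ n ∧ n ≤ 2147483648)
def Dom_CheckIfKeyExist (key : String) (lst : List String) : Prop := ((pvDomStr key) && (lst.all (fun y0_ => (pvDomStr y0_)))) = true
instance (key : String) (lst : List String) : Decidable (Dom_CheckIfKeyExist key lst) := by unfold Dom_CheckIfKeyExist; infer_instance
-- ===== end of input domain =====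

-- B hoists the key-wide isalpha test out of the loop and replaces A's inner
-- per-character counting loop by one set-subset test per element (simpler).
-- Both Pythons append '[' + key + ']' to lst when returning 1; the theorems
-- here are about the RETURN value only (B performs the same mutation).

-- ===== PORT A =====
-- inner 'for i in key' counting loop of A
def pvCntA (key : List Char) (k : String) : Nat :=
  key.foldl (fun cnt i =>
    if PySem.Str.isIn (String.ofList [i]) k && PySem.Chars.isalpha i then cnt + 1 else cnt) 0

-- outer 'for k in lst' loop of A with its early return
def pvLoopA (key : String) : List String → Int
  | [] => 1
  | k :: rest => if pvCntA key.toList k == key.toList.length then 0 else pvLoopA key rest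

def CheckIfKeyExist (key : String) (lst : List String) : Int :=
  pvLoopA key lst

-- ===== PORT B =====
def CheckIfKeyExist_alt (key : String) (lst : List String) : Int :=
  let allAlpha := key.toList.all PySem.Chars.isalpha
  let kset := PySem.Set.ofList key.toList
  if allAlpha && lst.any (fun k => PySem.Set.issubset kset (PySem.Set.ofList k.toList)) then 0
  else 1

-- ===== PRECONDITION & SPEC =====
def Spec_CheckIfKeyExist (key : String) (lst : List String) (out : Int) : Prop := out = CheckIfKeyExist_alt key lst
instance (key : String) (lst : List String) (out : Int) : Decidable (Spec_CheckIfKeyExist key lst out) := by unfold Spec_CheckIfKeyExist; infer_instance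

-- ===== CLAIM (what is proved, stated in full; the proofs are below) =====
def Claim_equal_CheckIfKeyExist : Prop := ∀ (key : String) (lst : List String), Dom_CheckIfKeyExist key lst → Spec_CheckIfKeyExist key lst (CheckIfKeyExist key lst)

-- ===== LEMMAS AND PROOFS =====

-- 'i in k' for a one-character i is character membership
theorem pv_singleton_isIn (c : Char) (k : String) :
    PySem.Str.isIn (String.ofList [c]) k = k.toList.contains c := by
  rcases h : k.toList.contains c with _ | _
  · rw [PySem.Str.isIn_eq, PySem.Chars.isIn_eq_false_iff]
    intro hinf
    have hsub : [c].Sublist k.toList := by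
      simpa using hinf.sublist
    have : c ∈ k.toList := (List.singleton_sublist).1 hsub
    simp_all
  · have hc : c ∈ k.toList := by simp_all
    obtain ⟨s, t, hst⟩ := List.append_of_mem hc
    rw [PySem.Str.isIn_eq, PySem.Chars.isIn_iff_infix]
    exact ⟨s, t, by simp [hst]⟩

-- counting loop with accumulator = countP
theorem pv_foldl_count (p : Char → Bool) (key : List Char) (n : Nat) :
    key.foldl (fun cnt i => if p i then cnt + 1 else cnt) n = n + key.countP p := by
  induction key generalizing n with
  | nil => simp
  | cons c cs ih =>
    simp only [List.foldl_cons, List.countP_cons, ih]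
    split_ifs <;> omega

-- A's per-element test equals B's (alpha-whole-key ∧ subset) test
theorem pv_elem_test (key : List Char) (k : String) :
    (pvCntA key k == key.length) =
      (key.all PySem.Chars.isalpha &&
        PySem.Set.issubset (PySem.Set.ofList key) (PySem.Set.ofList k.toList)) := by
  unfold pvCntA
  rw [pv_foldl_count, Bool.eq_iff_iff]
  simp only [Nat.zero_add, beq_iff_eq, List.countP_eq_length, Bool.and_eq_true,
    List.all_eq_true, PySem.Set.issubset_iff, PySem.Set.mem_ofList,
    pv_singleton_isIn, List.contains_iff_mem]
  exact ⟨fun h => ⟨fun c hc => (h c hc).2, fun c hc => (h c hc).1⟩,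
         fun ⟨ha, hs⟩ c hc => ⟨hs c hc, ha c hc⟩⟩

theorem pvLoopA_eq (key : String) (lst : List String) :
    pvLoopA key lst =
      if lst.any (fun k => key.toList.all PySem.Chars.isalpha &&
          PySem.Set.issubset (PySem.Set.ofList key.toList) (PySem.Set.ofList k.toList))
      then 0 else 1 := by
  induction lst with
  | nil => simp [pvLoopA]
  | cons k rest ih =>
    simp only [pvLoopA, List.any_cons]
    rw [pv_elem_test]
    by_cases h : (key.toList.all PySem.Chars.isalpha &&
        PySem.Set.issubset (PySem.Set.ofList key.toList) (PySem.Set.ofList k.toList)) = true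
    · simp [h]
    · rw [Bool.not_eq_true] at h
      simpa [h] using ih

-- ===== VERDICT (by name: the statement is the Claim_ definition above) =====
theorem CheckIfKeyExist_spec : Claim_equal_CheckIfKeyExist := by
  intro key lst _
  unfold Spec_CheckIfKeyExist CheckIfKeyExist CheckIfKeyExist_alt
  rw [pvLoopA_eq]
  by_cases ha : key.toList.all PySem.Chars.isalpha = true
  · simp [ha]
  · rw [Bool.not_eq_true] at ha
    simp [ha]
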